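-- pv_equiv track=rewrite | github.com/CodeAlive-AI/fpf-problem-solving-skill | scripts/split_spec.py | build_h1_sections
-- ===== SOURCE A (Python) =====
-- def build_h1_sections(headings: list, lines: list[str]) -> list:
--     h1_sections = []
--     current_h1 = None
--     current_h2s = []
--     for idx, (line_num, level, title) in enumerate(headings):
--         next_line = headings[idx + 1][0] if idx + 1 < len(headings) else len(lines)
--         block = lines[line_num:next_line]
--         if level == 1:
--             if current_h1 is not None:
--                 h1_sections.append((current_h1, current_h2s))
--             current_h1 = (line_num, title, block)
--             current_h2s = []
--         else:
--             current_h2s.append((line_num, title, block))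
--     if current_h1 is not None:
--         h1_sections.append((current_h1, current_h2s))
--     return h1_sections
-- ===== SOURCE B (Python) =====
-- def build_h1_sections(headings: list, lines: list[str]) -> list:
--     # Phase 1: precompute each heading's block from consecutive boundaries.
--     bounds = [h[0] for h in headings[1:]] + [len(lines)]
--     tagged = [(level, (ln, title, lines[ln:nxt]))
--               for (ln, level, title), nxt in zip(headings, bounds)]
--     # Phase 2: walk the precomputed blocks, slicing out each h1 section.
--     result = []
--     i = 0
--     n = len(tagged)
--     while i < n:
--         level, blk = tagged[i]
--         i += 1
--         if level != 1:
--             continue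
--         h2s = []
--         while i < n and tagged[i][0] != 1:
--             h2s.append(tagged[i][1])
--             i += 1
--         result.append((blk, h2s))
--     return result
-- ===== Notes on version B (the rewrite author's own statement) =====
-- stated objective: alternative
-- what changed: Replaces A's single streaming loop with flush-on-h1 state (current_h1/current_h2s) by a two-phase traversal: first precompute every heading's block by pairing consecutive heading boundaries, then slice the precomputed tagged list into h1 sections with an index walk that collects the run of non-h1 blocks after each h1.
import Mathlib
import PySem

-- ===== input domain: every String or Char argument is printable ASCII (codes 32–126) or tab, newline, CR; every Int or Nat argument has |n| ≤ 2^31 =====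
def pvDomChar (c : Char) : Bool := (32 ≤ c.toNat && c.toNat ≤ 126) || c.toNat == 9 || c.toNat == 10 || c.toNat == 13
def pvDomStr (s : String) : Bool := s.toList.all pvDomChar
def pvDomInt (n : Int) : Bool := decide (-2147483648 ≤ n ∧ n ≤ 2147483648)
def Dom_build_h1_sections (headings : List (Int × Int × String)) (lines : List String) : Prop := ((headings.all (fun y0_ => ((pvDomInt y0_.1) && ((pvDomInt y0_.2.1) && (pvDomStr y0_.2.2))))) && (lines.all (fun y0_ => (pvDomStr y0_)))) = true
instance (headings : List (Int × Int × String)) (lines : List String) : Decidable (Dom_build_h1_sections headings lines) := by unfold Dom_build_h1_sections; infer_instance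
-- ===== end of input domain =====

-- B replaces A's single streaming flush loop by two phases: precompute every heading's
-- block from consecutive boundaries, then slice the tagged block list into h1 sections
-- (objective: alternative decomposition, same cost).

-- ===== PORT A =====
-- A's loop state: (h1_sections, current_h1, current_h2s)
def pvStepA (headings : List (Int × Int × String)) (lines : List String)
    (st : List ((Int × String × List String) × List (Int × String × List String)) ×
          Option (Int × String × List String) × List (Int × String × List String))
    (p : Int × (Int × Int × String)) :
    List ((Int × String × List String) × List (Int × String × List String)) ×
      Option (Int × String × List String) × List (Int × String × List String) :=
  let idx := p.1
  let line_num := p.2.1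
  let level := p.2.2.1
  let title := p.2.2.2
  let next_line : Int :=
    if idx + 1 < (headings.length : Int) then
      ((PySem.List.pyGet? headings (idx + 1)).getD (0, 0, "")).1
    else (lines.length : Int)
  let block := PySem.List.slice lines (some line_num) (some next_line)
  if level == 1 then
    match st.2.1 with
    | some c => (st.1 ++ [(c, st.2.2)], some (line_num, title, block), [])
    | none => (st.1, some (line_num, title, block), [])
  else (st.1, st.2.1, st.2.2 ++ [(line_num, title, block)])

def build_h1_sections (headings : List (Int × Int × String)) (lines : List String) :
    List ((Int × String × List String) × (List (Int × String × List String))) :=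
  let r := (PySem.List.enumerate headings 0).foldl (pvStepA headings lines) ([], none, [])
  match r.2.1 with
  | some c => r.1 ++ [(c, r.2.2)]
  | none => r.1

-- ===== PORT B =====
-- inner while: collect consecutive non-h1 blocks, returning them and the remaining suffix
def pvSpanH2 : List (Int × (Int × String × List String)) →
    List (Int × String × List String) × List (Int × (Int × String × List String))
  | [] => ([], [])
  | (lv, b) :: rest =>
      if lv != 1 then
        let r := pvSpanH2 rest
        (b :: r.1, r.2)
      else ([], (lv, b) :: rest)

theorem pvSpanH2_snd_length_le : ∀ ts, (pvSpanH2 ts).2.length ≤ ts.length := by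
  intro ts
  induction ts with
  | nil => simp [pvSpanH2]
  | cons h t ih =>
      obtain ⟨lv, b⟩ := h
      by_cases hlv : lv != 1 <;> simp [pvSpanH2, hlv] <;> omega

-- outer while over the tagged list (index advance = consuming the suffix)
def pvGroup : List (Int × (Int × String × List String)) →
    List ((Int × String × List String) × List (Int × String × List String))
  | [] => []
  | (lv, b) :: rest =>
      if lv != 1 then pvGroup rest
      else
        let r := pvSpanH2 rest
        (b, r.1) :: pvGroup r.2
  termination_by ts => ts.length
  decreasing_by
    · simp
    · have := pvSpanH2_snd_length_le rest; simp; omega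

def build_h1_sections_alt (headings : List (Int × Int × String)) (lines : List String) :
    List ((Int × String × List String) × (List (Int × String × List String))) :=
  pvGroup ((headings.zip ((PySem.List.slice headings (some 1) none).map (·.1) ++ [(lines.length : Int)])).map
    (fun p => (p.1.2.1, (p.1.1, p.1.2.2, PySem.List.slice lines (some p.1.1) (some p.2)))))

-- ===== PRECONDITION & SPEC =====
def Spec_build_h1_sections (headings : List (Int × Int × String)) (lines : List String) (out : List ((Int × String × List String) × (List (Int × String × List String)))) : Prop := out = build_h1_sections_alt headings lines
instance (headings : List (Int × Int × String)) (lines : List String) (out : List ((Int × String × List String) × (List (Int × String × List String)))) : Decidable (Spec_build_h1_sections headings lines out) := by unfold Spec_build_h1_sections; infer_instance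

-- ===== CLAIM (what is proved, stated in full; the proofs are below) =====
def Claim_equal_build_h1_sections : Prop := ∀ (headings : List (Int × Int × String)) (lines : List String), Dom_build_h1_sections headings lines → Spec_build_h1_sections headings lines (build_h1_sections headings lines)

-- ===== LEMMAS AND PROOFS =====

-- the tagged list, recursively (next boundary = next heading's line or len(lines))
def pvTagged (lines : List String) : List (Int × Int × String) →
    List (Int × (Int × String × List String))
  | [] => []
  | h :: rest =>
      let nxt : Int := match rest with
        | [] => (lines.length : Int)
        | h' :: _ => h'.1
      (h.2.1, (h.1, h.2.2, PySem.List.slice lines (some h.1) (some nxt))) :: pvTagged lines rest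

-- B's zip-built tagged list equals pvTagged
theorem tagged_eq (lines : List String) : ∀ (hs : List (Int × Int × String)),
    (hs.zip (((PySem.List.slice hs (some 1) none).map (·.1)) ++ [(lines.length : Int)])).map
      (fun p => (p.1.2.1, (p.1.1, p.1.2.2, PySem.List.slice lines (some p.1.1) (some p.2))))
    = pvTagged lines hs := by
  intro hs
  induction hs with
  | nil => simp [pvTagged]
  | cons h t ih =>
      cases t with
      | nil => simp [pvTagged, PySem.List.slice_from_one]
      | cons h' t' =>
          simp only [PySem.List.slice_from_one] at ih ⊢
          simp only [List.tail_cons, List.map_cons] at ih ⊢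
          simp [pvTagged, ih]

-- fold step over the tagged list (same core as A's step, boundary already computed)
def pvStepT
    (st : List ((Int × String × List String) × List (Int × String × List String)) ×
          Option (Int × String × List String) × List (Int × String × List String))
    (q : Int × (Int × String × List String)) :
    List ((Int × String × List String) × List (Int × String × List String)) ×
      Option (Int × String × List String) × List (Int × String × List String) :=
  if q.1 == 1 then
    match st.2.1 with
    | some c => (st.1 ++ [(c, st.2.2)], some q.2, [])
    | none => (st.1, some q.2, [])
  else (st.1, st.2.1, st.2.2 ++ [q.2])

-- A's enumerated fold over the suffix starting at k equals the pvStepT fold over the suffix's tagged list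
theorem foldA_suffix (full : List (Int × Int × String)) (lines : List String) :
    ∀ (k : Nat) st, (PySem.List.enumerate (full.drop k) (k : Int)).foldl (pvStepA full lines) st
      = (pvTagged lines (full.drop k)).foldl pvStepT st := by
  intro k
  induction hk : full.length - k generalizing k with
  | zero =>
      intro st
      have : full.drop k = [] := List.drop_eq_nil_of_le (by omega)
      simp [this, pvTagged]
  | succ n ih =>
      intro st
      have hlt : k < full.length := by omega
      obtain ⟨h, rest, hd⟩ : ∃ h rest, full.drop k = h :: rest := by
        cases hdd : full.drop k with
        | nil => exfalso; have := List.length_drop (l := full) (i := k); rw [hdd] at this; simp at this; omega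
        | cons a b => exact ⟨a, b, rfl⟩
      have hrest : full.drop (k + 1) = rest := by
        rw [← List.tail_drop, hd]; rfl
      rw [hd, PySem.List.enumerate_cons]
      simp only [pvTagged, List.foldl_cons]
      cases rest with
      | nil =>
          have hlen : full.length = k + 1 := by
            have := List.length_drop (l := full) (i := k); rw [hd] at this; simp at this; omega
          have hcond : ¬ ((k : Int) + 1 < (full.length : Int)) := by rw [hlen]; push_cast; omega
          have hstep : pvStepA full lines st ((k : Int), h)
              = pvStepT st (h.2.1, (h.1, h.2.2,
                  PySem.List.slice lines (some h.1) (some (lines.length : Int)))) := by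
            simp only [pvStepA, pvStepT]
            simp [hcond]
          rw [hstep]
          simp [PySem.List.enumerate_nil, pvTagged]
      | cons h' t' =>
          have hlen : k + 1 < full.length := by
            have := List.length_drop (l := full) (i := k); rw [hd] at this; simp at this; omega
          have hcond : ((k : Int) + 1 < (full.length : Int)) := by push_cast; omega
          have hget : PySem.List.pyGet? full ((k : Int) + 1) = full[k+1]? := by
            have : ((k : Int) + 1) = ((k + 1 : Nat) : Int) := by push_cast; ring
            rw [this, PySem.List.pyGet?_natCast]
          have hidx : full[k+1]? = some h' := by
            have h0 : (full.drop (k+1))[0]? = full[k+1]? := by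
              rw [List.getElem?_drop]
            rw [hrest] at h0
            simpa using h0.symm
          have hstep : pvStepA full lines st ((k : Int), h)
              = pvStepT st (h.2.1, (h.1, h.2.2,
                  PySem.List.slice lines (some h.1) (some h'.1))) := by
            simp only [pvStepA, pvStepT]
            rw [if_pos hcond, hget, hidx]
            simp
          rw [hstep]
          have hih := ih (k + 1) (by omega)
            (pvStepT st (h.2.1, (h.1, h.2.2, PySem.List.slice lines (some h.1) (some h'.1))))
          rw [hrest] at hih
          push_cast at hih
          exact hih

-- finalize A's state
def pvFin
    (st : List ((Int × String × List String) × List (Int × String × List String)) ×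
          Option (Int × String × List String) × List (Int × String × List String)) :
    List ((Int × String × List String) × List (Int × String × List String)) :=
  match st.2.1 with
  | some c => st.1 ++ [(c, st.2.2)]
  | none => st.1

-- the flush fold, finalized, equals the grouping recursion
theorem fold_group : ∀ (ts : List (Int × (Int × String × List String))) acc cur h2s,
    pvFin (ts.foldl pvStepT (acc, cur, h2s))
      = acc ++ (match cur with
          | none => pvGroup ts
          | some c => (c, h2s ++ (pvSpanH2 ts).1) :: pvGroup (pvSpanH2 ts).2) := by
  intro ts
  induction ts with
  | nil =>
      intro acc cur h2s
      cases cur <;> simp [pvFin, pvSpanH2, pvGroup]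
  | cons q rest ih =>
      intro acc cur h2s
      obtain ⟨lv, b⟩ := q
      by_cases hlv : lv = 1
      · subst hlv
        cases cur with
        | none =>
            simp only [List.foldl_cons, pvStepT]
            simp only [beq_self_eq_true, if_pos]
            rw [ih]
            simp [pvGroup, pvSpanH2]
        | some c =>
            simp only [List.foldl_cons, pvStepT]
            simp only [beq_self_eq_true, if_pos]
            rw [ih]
            simp [pvGroup, pvSpanH2]
      · have hbeq : ((lv : Int) == 1) = false := by simp [hlv]
        cases cur with
        | none =>
            simp only [List.foldl_cons, pvStepT, hbeq]
            simp only [Bool.false_eq_true, if_false]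
            rw [ih]
            simp [pvGroup, pvSpanH2, hlv]
        | some c =>
            simp only [List.foldl_cons, pvStepT, hbeq]
            simp only [Bool.false_eq_true, if_false]
            rw [ih]
            simp [pvGroup, pvSpanH2, hlv]

-- ===== VERDICT (by name: the statement is the Claim_ definition above) =====
theorem build_h1_sections_spec : Claim_equal_build_h1_sections := by
  intro headings lines _
  unfold Spec_build_h1_sections build_h1_sections build_h1_sections_alt
  have h1 := foldA_suffix headings lines 0 ([], none, [])
  simp only [List.drop_zero, Nat.cast_zero] at h1
  show pvFin _ = _
  rw [h1, tagged_eq, fold_group]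
  simp
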